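-- pv_equiv track=rewrite | github.com/Lexxx42/Introduction_to_programming_languages | Python programming course_STEP/5_lists/hw3.py | count_similar
-- ===== SOURCE A (Python) =====
-- def count_similar(in_list):
--     out_list = []
--     temp = None
--     for i in range(len(in_list)):
--         if i == len(in_list)-1:
--             break
--         if in_list[i] == in_list[i+1] and in_list[i] != temp:
--             out_list.append(in_list[i])
--             temp = in_list[i]
--     return out_list
-- ===== SOURCE B (Python) =====
-- def count_similar(in_list):
--     # Run-length encode the list, then emit each run's value when the run
--     # has length >= 2 and the value differs from the last emitted one.
--     runs = []
--     for x in in_list: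
--         if runs and runs[-1][0] == x:
--             runs[-1][1] += 1
--         else:
--             runs.append([x, 1])
--     out_list = []
--     for value, count in runs:
--         if count >= 2 and (not out_list or out_list[-1] != value):
--             out_list.append(value)
--     return out_list
-- ===== Notes on version B (the rewrite author's own statement) =====
-- stated objective: alternative
-- what changed: Replaces the index-based adjacent-pair scan with a sentinel variable by a two-pass algorithm: run-length encode the list, then emit each run value whose run length is >= 2 unless it equals the last emitted value.
import Mathlib
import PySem

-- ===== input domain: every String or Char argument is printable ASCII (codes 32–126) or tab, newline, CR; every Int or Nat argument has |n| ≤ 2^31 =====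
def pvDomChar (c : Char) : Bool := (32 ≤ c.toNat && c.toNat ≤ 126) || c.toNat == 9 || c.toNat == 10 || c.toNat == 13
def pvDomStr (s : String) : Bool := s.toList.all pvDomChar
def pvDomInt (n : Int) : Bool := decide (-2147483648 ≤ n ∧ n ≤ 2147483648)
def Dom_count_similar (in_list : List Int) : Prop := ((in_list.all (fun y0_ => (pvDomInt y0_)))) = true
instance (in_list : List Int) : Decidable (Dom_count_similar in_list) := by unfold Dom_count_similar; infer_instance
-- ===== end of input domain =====

-- B replaces A's index-based adjacent-pair scan (with a last-emitted sentinel) by a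
-- two-pass algorithm: run-length encode, then filter runs of length ≥ 2, skipping a
-- value equal to the last emitted one. Alternative decomposition, same cost.

-- ===== PORT A =====
-- index loop; the `i = length - 1` test is Python's `break`; `getD _ 0` is in-range
-- indexing only (both guards ensure i+1 < length), so it is exact here.
def count_similar_go (l : List Int) (out : List Int) (temp : Option Int) (i : Nat) : List Int :=
  if _h : i < l.length then
    if i = l.length - 1 then out
    else
      let c := l.getD i 0
      if c = l.getD (i+1) 0 ∧ temp ≠ some c then
        count_similar_go l (out ++ [c]) (some c) (i+1)
      else
        count_similar_go l out temp (i+1)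
  else out
termination_by l.length - i

def count_similar (in_list : List Int) : List Int :=
  count_similar_go in_list [] none 0

-- ===== PORT B =====
-- first pass of Source B: run-length encoding; mutating runs[-1][1] += 1 is ported as
-- dropLast ++ [(v, c+1)].
def rleStep (runs : List (Int × Int)) (x : Int) : List (Int × Int) :=
  match runs.getLast? with
  | some (v, c) => if v = x then runs.dropLast ++ [(v, c+1)] else runs ++ [(x, 1)]
  | none => runs ++ [(x, 1)]

def count_similar_alt (in_list : List Int) : List Int :=
  let runs := in_list.foldl rleStep []
  runs.foldl (fun out vc =>
    if 2 ≤ vc.2 ∧ out.getLast? ≠ some vc.1 then out ++ [vc.1] else out) []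

-- ===== PRECONDITION & SPEC =====
def Spec_count_similar (in_list : List Int) (out : List Int) : Prop := out = count_similar_alt in_list
instance (in_list : List Int) (out : List Int) : Decidable (Spec_count_similar in_list out) := by unfold Spec_count_similar; infer_instance

-- ===== CLAIM (what is proved, stated in full; the proofs are below) =====
def Claim_equal_count_similar : Prop := ∀ (in_list : List Int), Dom_count_similar in_list → Spec_count_similar in_list (count_similar in_list)

-- ===== LEMMAS AND PROOFS =====

-- canonical run-length encoding and run filter, the common normal form of both ports
def consRun (v c : Int) : List (Int × Int) → List (Int × Int)
  | (w, d) :: t => if w = v then (v, c + d) :: t else (v, c) :: (w, d) :: t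
  | [] => [(v, c)]

def cRLE : List Int → List (Int × Int)
  | [] => []
  | a :: xs => consRun a 1 (cRLE xs)

def filtF : List (Int × Int) → Option Int → List Int
  | [], _ => []
  | (v, c) :: rs, temp =>
      if 2 ≤ c ∧ temp ≠ some v then v :: filtF rs (some v) else filtF rs temp

-- A's loop restated as structural recursion on the remaining suffix
def goL : List Int → List Int → Option Int → List Int
  | a :: b :: rest, out, temp =>
      if a = b ∧ temp ≠ some a then goL (b :: rest) (out ++ [a]) (some a)
      else goL (b :: rest) out temp
  | _, out, _ => out

theorem consRun_headval (v c : Int) (r : List (Int × Int)) :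
    ∃ d t, consRun v c r = (v, d) :: t := by
  match r with
  | [] => exact ⟨c, [], rfl⟩
  | (w, d) :: t =>
    by_cases h : w = v
    · exact ⟨c + d, t, by simp [consRun, h]⟩
    · exact ⟨c, (w, d) :: t, by simp [consRun, h]⟩

theorem consRun_spec (v c : Int) (r : List (Int × Int)) (hc : 0 < c)
    (hr : ∀ p ∈ r, 0 < p.2) :
    ∃ d t, consRun v c r = (v, d) :: t ∧ c ≤ d ∧ ∀ p ∈ ((v, d) :: t : List (Int × Int)), 0 < p.2 := by
  match r with
  | [] => exact ⟨c, [], rfl, le_refl c, by simpa using hc⟩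
  | (w, d) :: t =>
    by_cases h : w = v
    · refine ⟨c + d, t, by simp [consRun, h], ?_, ?_⟩
      · have := hr (w, d) (by simp)
        simp at this; omega
      · intro p hp
        rcases List.mem_cons.mp hp with h1 | h1
        · subst h1; have := hr (w, d) (by simp); simp_all; omega
        · exact hr p (by simp [h1])
    · refine ⟨c, (w, d) :: t, by simp [consRun, h], le_refl c, ?_⟩
      intro p hp
      rcases List.mem_cons.mp hp with h1 | h1
      · subst h1; simpa using hc
      · exact hr p h1

theorem cRLE_pos : ∀ (l : List Int), ∀ p ∈ cRLE l, 0 < p.2 := by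
  intro l
  induction l with
  | nil => simp [cRLE]
  | cons a xs ih =>
    obtain ⟨d, t, heq, -, hpos⟩ := consRun_spec a 1 (cRLE xs) (by omega) ih
    rw [cRLE, heq]
    exact hpos

theorem goL_index (n : Nat) : ∀ (l : List Int) (out : List Int) (temp : Option Int) (i : Nat),
    l.length - i = n → count_similar_go l out temp i = goL (l.drop i) out temp := by
  induction n with
  | zero =>
    intro l out temp i h
    have hle : l.length ≤ i := by omega
    rw [count_similar_go]
    simp [Nat.not_lt.mpr hle, List.drop_of_length_le hle, goL]
  | succ n ih =>
    intro l out temp i h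
    have hi : i < l.length := by omega
    have hdrop : l.drop i = l[i] :: l.drop (i + 1) := List.drop_eq_getElem_cons hi
    rw [count_similar_go]
    by_cases hlast : i = l.length - 1
    · have h2 : l.drop (i + 1) = [] := List.drop_of_length_le (by omega)
      rw [hdrop, h2]
      simp [hi, hlast, goL]
    · have hi1 : i + 1 < l.length := by omega
      have hdrop1 : l.drop (i + 1) = l[i + 1] :: l.drop (i + 2) :=
        List.drop_eq_getElem_cons hi1
      have hgd : l.getD i 0 = l[i] := List.getD_eq_getElem l 0 hi
      have hgd1 : l.getD (i + 1) 0 = l[i + 1] := List.getD_eq_getElem l 0 hi1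
      simp only [hi, hlast, if_true, if_false, dif_pos, if_neg]
      rw [hdrop, hdrop1, goL]
      simp only [hgd, hgd1]
      by_cases hc : l[i] = l[i + 1] ∧ temp ≠ some l[i]
      · rw [if_pos hc, if_pos hc, ih l _ _ (i + 1) (by omega), hdrop1]
      · rw [if_neg hc, if_neg hc, ih l _ _ (i + 1) (by omega), hdrop1]

theorem cRLE_head (a : Int) (xs : List Int) :
    ∃ c t, cRLE (a :: xs) = (a, c) :: t ∧ 1 ≤ c := by
  obtain ⟨d, t, heq, hle, -⟩ := consRun_spec a 1 (cRLE xs) (by omega) (cRLE_pos xs)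
  exact ⟨d, t, by rw [cRLE, heq], hle⟩

theorem goL_eq_filtF : ∀ (l : List Int) (out : List Int) (temp : Option Int),
    goL l out temp = out ++ filtF (cRLE l) temp := by
  intro l
  induction l with
  | nil => intro out temp; simp [goL, cRLE, filtF]
  | cons a t ih =>
    intro out temp
    match t with
    | [] =>
      simp only [goL, cRLE, consRun, filtF]
      have : ¬ (2 ≤ (1 : Int) ∧ temp ≠ some a) := by
        rintro ⟨h, -⟩; omega
      simp [filtF, this]
    | b :: ys =>
      obtain ⟨c, rs, hrle, hc⟩ := cRLE_head b ys
      by_cases hab : a = b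
      · subst hab
        have hrle2 : cRLE (a :: a :: ys) = (a, 1 + c) :: rs := by
          rw [show cRLE (a :: a :: ys) = consRun a 1 (cRLE (a :: ys)) from rfl, hrle]
          simp [consRun]
        by_cases htemp : temp ≠ some a
        · rw [goL, if_pos ⟨rfl, htemp⟩, ih, hrle, hrle2]
          have h1 : filtF ((a, c) :: rs) (some a) = filtF rs (some a) := by
            simp [filtF]
          have h2 : filtF ((a, 1 + c) :: rs) temp = a :: filtF rs (some a) := by
            rw [filtF, if_pos ⟨by omega, htemp⟩]
          rw [h1, h2]; simp
        · rw [not_not] at htemp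
          rw [goL, if_neg (by simp [htemp]), ih, hrle, hrle2, htemp]
          have h1 : filtF ((a, c) :: rs) (some a) = filtF rs (some a) := by
            simp [filtF]
          have h2 : filtF ((a, 1 + c) :: rs) (some a) = filtF rs (some a) := by
            simp [filtF]
          rw [h1, h2]
      · have hrle2 : cRLE (a :: b :: ys) = (a, 1) :: (b, c) :: rs := by
          rw [show cRLE (a :: b :: ys) = consRun a 1 (cRLE (b :: ys)) from rfl, hrle]
          simp only [consRun]
          rw [if_neg (fun h => hab h.symm)]
        rw [goL, if_neg (by rintro ⟨h, -⟩; exact hab h), ih, hrle, hrle2]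
        have h1 : filtF ((a, 1) :: (b, c) :: rs) temp = filtF ((b, c) :: rs) temp := by
          rw [filtF, if_neg (by rintro ⟨h, -⟩; omega)]
        rw [h1]

theorem consRun_consRun (v c d : Int) (r : List (Int × Int)) :
    consRun v c (consRun v d r) = consRun v (c + d) r := by
  match r with
  | [] => simp [consRun]
  | (w, e) :: t =>
    by_cases h : w = v
    · simp [consRun, h, add_assoc]
    · simp [consRun, h]

theorem foldl_rleStep : ∀ (l : List Int) (rs : List (Int × Int)) (v c : Int),
    List.foldl rleStep (rs ++ [(v, c)]) l = rs ++ consRun v c (cRLE l) := by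
  intro l
  induction l with
  | nil => intro rs v c; simp [cRLE, consRun]
  | cons x xs ih =>
    intro rs v c
    rw [List.foldl_cons]
    have hstep : rleStep (rs ++ [(v, c)]) x =
        if v = x then rs ++ [(v, c + 1)] else (rs ++ [(v, c)]) ++ [(x, 1)] := by
      simp [rleStep, List.getLast?_concat]
    by_cases hvx : v = x
    · rw [hstep, if_pos hvx, ih]
      subst hvx
      rw [show cRLE (v :: xs) = consRun v 1 (cRLE xs) from rfl, consRun_consRun]
    · rw [hstep, if_neg hvx, ih]
      obtain ⟨d, t, hhead⟩ := consRun_headval x 1 (cRLE xs)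
      rw [show cRLE (x :: xs) = consRun x 1 (cRLE xs) from rfl, hhead,
        show consRun v c ((x, d) :: t) = (v, c) :: (x, d) :: t by
          simp only [consRun]; rw [if_neg (Ne.symm hvx)]]
      simp

theorem foldl_rleStep_nil (l : List Int) : l.foldl rleStep [] = cRLE l := by
  match l with
  | [] => rfl
  | x :: xs =>
    rw [List.foldl_cons, show rleStep [] x = [] ++ [(x, 1)] from rfl, foldl_rleStep]
    rfl

theorem foldl_filt : ∀ (rs : List (Int × Int)) (out : List Int),
    rs.foldl (fun out vc =>
      if 2 ≤ vc.2 ∧ out.getLast? ≠ some vc.1 then out ++ [vc.1] else out) out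
      = out ++ filtF rs out.getLast? := by
  intro rs
  induction rs with
  | nil => intro out; simp [filtF]
  | cons vc t ih =>
    intro out
    obtain ⟨v, c⟩ := vc
    rw [List.foldl_cons]
    by_cases h : 2 ≤ c ∧ out.getLast? ≠ some v
    · simp only [if_pos h]
      rw [ih, List.getLast?_concat, filtF, if_pos h]
      simp
    · simp only [if_neg h]
      rw [ih, filtF, if_neg h]

-- ===== VERDICT (by name: the statement is the Claim_ definition above) =====
theorem count_similar_spec : Claim_equal_count_similar := by
  intro in_list _
  unfold Spec_count_similar count_similar count_similar_alt
  rw [goL_index (in_list.length) in_list [] none 0 rfl, List.drop_zero,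
    goL_eq_filtF, foldl_rleStep_nil, foldl_filt]
  rfl
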